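-- pv_equiv track=rewrite | github.com/disha2027/Disha-Bhat | program3.py | generate_odd_series_conditionally
-- ===== SOURCE A (Python) =====
-- def generate_odd_series_conditionally(a):
--     result = []
--     if a % 2 != 0:  # Only for odd inputs
--         for i in range(a):
--             result.append(2 * i + 1)
--     else:
--         for i in range(a - 1):
--             if i % 2 == 0:
--                 result.append(2 * i + 1)
--     return result
-- ===== SOURCE B (Python) =====
-- def generate_odd_series_conditionally(a):
--     if a % 2 != 0:
--         last, step = 2 * a - 1, 2
--     else:
--         last, step = 2 * a - 3, 4
--     out = []
--     x = last
--     while x >= 1: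
--         out.append(x)
--         x -= step
--     out.reverse()
--     return out
-- ===== Notes on version B (the rewrite author's own statement) =====
-- stated objective: alternative
-- what changed: B builds the series back-to-front: it computes the branch's last element (2a-1 or 2a-3) and stride (2 or 4), descends from it with a single while loop appending as it goes, then reverses - replacing A's forward range enumeration and the even branch's parity filter.
import Mathlib
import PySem

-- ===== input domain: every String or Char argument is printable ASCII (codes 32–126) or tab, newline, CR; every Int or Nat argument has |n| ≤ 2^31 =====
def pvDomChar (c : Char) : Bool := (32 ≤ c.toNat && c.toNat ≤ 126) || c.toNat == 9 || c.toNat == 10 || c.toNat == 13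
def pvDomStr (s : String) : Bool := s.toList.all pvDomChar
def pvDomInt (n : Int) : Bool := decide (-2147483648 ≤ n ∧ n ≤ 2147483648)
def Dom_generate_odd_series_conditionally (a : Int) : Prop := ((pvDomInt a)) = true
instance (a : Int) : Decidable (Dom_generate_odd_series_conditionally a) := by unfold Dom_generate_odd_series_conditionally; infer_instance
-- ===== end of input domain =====

-- B builds the series back-to-front: it computes the last element and the stride for the branch,
-- descends from it to 1 with a while loop, then reverses — no range enumeration, no parity filter (alternative decomposition).
-- ===== PORT A =====
def generate_odd_series_conditionally (a : Int) : List Int :=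
  let result : List Int := []
  if PySem.Int.mod a 2 ≠ 0 then
    (PySem.List.pyRange 0 a 1).foldl (fun acc i => acc ++ [2 * i + 1]) result
  else
    (PySem.List.pyRange 0 (a - 1) 1).foldl
      (fun acc i => if PySem.Int.mod i 2 = 0 then acc ++ [2 * i + 1] else acc) result

-- ===== PORT B =====
-- the 'while x >= 1: out.append(x); x -= step' loop of Source B; the '1 ≤ step' conjunct is only the
-- totality guard (both call sites pass step = 2 or 4, where it always holds)
def pvDown (step : Int) (x : Int) (acc : List Int) : List Int :=
  if 1 ≤ x ∧ 1 ≤ step then pvDown step (x - step) (acc ++ [x]) else acc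
termination_by x.toNat
decreasing_by omega

def generate_odd_series_conditionally_alt (a : Int) : List Int :=
  let ls : Int × Int := if PySem.Int.mod a 2 ≠ 0 then (2 * a - 1, 2) else (2 * a - 3, 4)
  (pvDown ls.2 ls.1 []).reverse

-- ===== PRECONDITION & SPEC =====
def Spec_generate_odd_series_conditionally (a : Int) (out : List Int) : Prop := out = generate_odd_series_conditionally_alt a
instance (a : Int) (out : List Int) : Decidable (Spec_generate_odd_series_conditionally a out) := by unfold Spec_generate_odd_series_conditionally; infer_instance

-- ===== CLAIM (what is proved, stated in full; the proofs are below) =====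
def Claim_equal_generate_odd_series_conditionally : Prop := ∀ (a : Int), Dom_generate_odd_series_conditionally a → Spec_generate_odd_series_conditionally a (generate_odd_series_conditionally a)

-- ===== LEMMAS AND PROOFS =====

lemma pvDown_of_lt (step x : Int) (acc : List Int) (h : x < 1) : pvDown step x acc = acc := by
  rw [pvDown]; simp [show ¬(1 ≤ x ∧ 1 ≤ step) by omega]

-- the descending loop started at 1 + step*n produces the reversed ascending map
lemma pvDown_desc (step : Int) (hs : 1 ≤ step) (n : Nat) (acc : List Int) :
    pvDown step (1 + step * n) acc =
      acc ++ ((List.range (n + 1)).map (fun k : Nat => 1 + step * (k : Int))).reverse := by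
  induction n generalizing acc with
  | zero =>
    rw [pvDown]
    simp only [Nat.cast_zero, mul_zero, add_zero]
    rw [if_pos ⟨le_refl 1, hs⟩, pvDown_of_lt _ _ _ (by omega)]
    simp
  | succ m ih =>
    have hpos : (1 : Int) ≤ 1 + step * ((m + 1 : Nat) : Int) := by
      have h0 : (0 : Int) ≤ step * ((m + 1 : Nat) : Int) :=
        mul_nonneg (by omega) (by exact_mod_cast Nat.zero_le _)
      omega
    rw [pvDown, if_pos ⟨hpos, hs⟩]
    have hx : 1 + step * ((m + 1 : Nat) : Int) - step = 1 + step * (m : Int) := by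
      push_cast; ring
    rw [hx, ih]
    rw [List.range_succ (n := m + 1), List.map_append, List.reverse_append]
    simp

-- evens of range N are the doubles of range ⌈N/2⌉
lemma filter_even_range (N : Nat) :
    (List.range N).filter (fun k => k % 2 == 0) = (List.range ((N + 1) / 2)).map (fun k => 2 * k) := by
  induction N with
  | zero => simp
  | succ n ih =>
    rw [List.range_succ, List.filter_append, ih]
    rcases Nat.even_or_odd n with h | h
    · have h2 : n % 2 = 0 := Nat.even_iff.mp h
      have h1 : (n + 1 + 1) / 2 = (n + 1) / 2 + 1 := by omega
      have h3 : 2 * ((n + 1) / 2) = n := by omega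
      rw [h1, List.range_succ, List.map_append]
      simp [h2, h3]
    · have h2 : n % 2 = 1 := Nat.odd_iff.mp h
      have h1 : (n + 1 + 1) / 2 = (n + 1) / 2 := by omega
      simp [h1, h2]

-- A's odd branch as an ascending map over List.range
lemma a_odd (a : Int) :
    (PySem.List.pyRange 0 a 1).foldl (fun acc i => acc ++ [2 * i + 1]) [] =
      (List.range a.toNat).map (fun k : Nat => 1 + 2 * (k : Int)) := by
  rw [PySem.List.foldl_append_singleton_eq_map, PySem.List.pyRange_one, List.map_map]
  simp only [Int.sub_zero]
  apply List.map_congr_left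
  intro k _
  simp only [Function.comp]
  omega

-- A's even branch as an ascending map over List.range
lemma a_even (a : Int) :
    (PySem.List.pyRange 0 (a - 1) 1).foldl
      (fun acc i => if PySem.Int.mod i 2 = 0 then acc ++ [2 * i + 1] else acc) [] =
      (List.range (((a - 1).toNat + 1) / 2)).map (fun k : Nat => 1 + 4 * (k : Int)) := by
  rw [PySem.List.foldl_append_ite, PySem.List.pyRange_one]
  simp only [Int.sub_zero]
  rw [List.filter_map]
  have hcomp : (fun i => decide (PySem.Int.mod i 2 = 0)) ∘ (fun k : Nat => (0 : Int) + (k : Int)) =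
      (fun k : Nat => k % 2 == 0) := by
    funext k
    have hmk : PySem.Int.mod ((0 : Int) + (k : Int)) 2 = ((k % 2 : Nat) : Int) := by
      rw [zero_add]; exact_mod_cast PySem.Int.mod_natCast k 2
    simp only [Function.comp, hmk]
    rcases Nat.mod_two_eq_zero_or_one k with h2 | h2 <;> simp [h2]
  rw [hcomp, filter_even_range, List.map_map, List.map_map]
  apply List.map_congr_left
  intro k _
  simp only [Function.comp]
  push_cast
  ring

-- B as an ascending map: pvDown from 1 + step*(n-1), reversed, for n elements
lemma b_map (step : Int) (hs : 1 ≤ step) (n : Nat) (hn : 0 < n) :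
    (pvDown step (1 + step * ((n : Int) - 1)) []).reverse =
      (List.range n).map (fun k : Nat => 1 + step * (k : Int)) := by
  obtain ⟨m, rfl⟩ : ∃ m, n = m + 1 := ⟨n - 1, by omega⟩
  have h1 : ((m + 1 : Nat) : Int) - 1 = (m : Nat) := by push_cast; ring
  rw [h1, pvDown_desc step hs m []]
  simp

-- ===== VERDICT (by name: the statement is the Claim_ definition above) =====
theorem generate_odd_series_conditionally_spec : Claim_equal_generate_odd_series_conditionally := by
  intro a _
  unfold Spec_generate_odd_series_conditionally generate_odd_series_conditionally generate_odd_series_conditionally_alt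
  by_cases h : PySem.Int.mod a 2 = 0
  · -- even branch
    simp only [h, ne_eq, not_true_eq_false, if_false]
    rw [a_even a]
    have ha2 : (2 : Int) ∣ a := (PySem.Int.mod_eq_zero_iff_dvd a 2).mp h
    obtain ⟨q, rfl⟩ := ha2
    by_cases hq : 1 ≤ q
    · have hn : (((2 * q - 1).toNat + 1) / 2) = q.toNat := by omega
      have hlast : 2 * (2 * q) - 3 = 1 + 4 * ((q.toNat : Int) - 1) := by omega
      rw [hn, hlast, b_map 4 (by norm_num) q.toNat (by omega)]
    · have hn : (((2 * q - 1).toNat + 1) / 2) = 0 := by omega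
      rw [hn, pvDown_of_lt _ _ _ (by omega)]
      simp
  · -- odd branch
    simp only [ne_eq, h, not_false_eq_true, if_pos]
    rw [a_odd a]
    by_cases ha : 1 ≤ a
    · have hlast : 2 * a - 1 = 1 + 2 * ((a.toNat : Int) - 1) := by omega
      rw [hlast, b_map 2 (by norm_num) a.toNat (by omega)]
    · have hn : a.toNat = 0 := by omega
      rw [hn, pvDown_of_lt _ _ _ (by omega)]
      simp
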